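-- pv_equiv track=rewrite | github.com/8Dionysus/aoa-evals | scorers/recurrence_control_plane_integrity.py | compare_expected
-- ===== SOURCE A (Python) =====
-- from typing import Any, Mapping
--
-- def compare_expected(
--     report: Mapping[str, Any], expected: Mapping[str, str]
-- ) -> list[str]:
--     by = {
--         r.get("axis"): r.get("status")
--         for r in report.get("axis_results", [])
--         if isinstance(r, Mapping)
--     }
--     return [
--         f"{a}: expected {e!r}, got {by.get(a)!r}"
--         for a, e in expected.items()
--         if by.get(a) != e
--     ]
-- ===== SOURCE B (Python) =====
-- from typing import Any, Mapping
--
-- def compare_expected(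
--     report: Mapping[str, Any], expected: Mapping[str, str]
-- ) -> list[str]:
--     problems = []
--     records = report.get("axis_results", [])
--     for a, e in expected.items():
--         found = None
--         for r in records:
--             if isinstance(r, Mapping) and r.get("axis") == a:
--                 found = r.get("status")  # last match wins, like the dict build
--         if found != e:
--             problems.append(f"{a}: expected {e!r}, got {found!r}")
--     return problems
-- ===== Notes on version B (the rewrite author's own statement) =====
-- stated objective: alternative
-- what changed: B drops A's precomputed axis->status dict: for each expected axis it scans the axis_results records directly, keeping the last matching status, then compares.
import Mathlib
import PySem

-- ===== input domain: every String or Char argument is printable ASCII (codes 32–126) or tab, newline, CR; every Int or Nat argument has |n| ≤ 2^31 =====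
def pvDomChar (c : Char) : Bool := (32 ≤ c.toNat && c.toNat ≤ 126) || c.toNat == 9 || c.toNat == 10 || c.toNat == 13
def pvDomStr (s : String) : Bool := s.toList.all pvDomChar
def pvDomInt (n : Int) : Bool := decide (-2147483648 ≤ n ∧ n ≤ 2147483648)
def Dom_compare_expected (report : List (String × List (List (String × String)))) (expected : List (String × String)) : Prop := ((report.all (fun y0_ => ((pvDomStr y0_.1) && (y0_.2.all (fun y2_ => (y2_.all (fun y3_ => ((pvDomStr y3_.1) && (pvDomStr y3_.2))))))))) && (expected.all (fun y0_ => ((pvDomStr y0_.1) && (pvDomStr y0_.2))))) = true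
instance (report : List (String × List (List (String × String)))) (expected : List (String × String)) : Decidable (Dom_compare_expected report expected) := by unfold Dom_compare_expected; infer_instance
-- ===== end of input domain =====

-- B replaces A's precomputed axis→status dict by a direct per-axis scan of the records
-- (last match wins), a differently-shaped traversal of the same data (objective: alternative).

-- Python repr of an ASCII string (exact on the Dom alphabet: printable ASCII + tab/newline/CR);
-- used by both ports, as both Pythons format with the same f-string `{…!r}`.
def pyReprChars (cs : List Char) : List Char :=
  let q : Char := if cs.contains '\'' && !(cs.contains '"') then '"' else '\''
  q :: (cs.flatMap (fun c =>
    if c = '\\' then ['\\', '\\']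
    else if c = q then ['\\', q]
    else if c = '\t' then ['\\', 't']
    else if c = '\n' then ['\\', 'n']
    else if c = '\r' then ['\\', 'r']
    else [c])) ++ [q]

def pyReprStr (s : String) : String := String.ofList (pyReprChars s.toList)

-- repr of an Optional[str]: None prints as "None"
def pyReprOpt (o : Option String) : String :=
  match o with
  | none => "None"
  | some s => pyReprStr s

-- f"{a}: expected {e!r}, got {g!r}"
def pvFmt (a e : String) (g : Option String) : String :=
  a ++ ": expected " ++ pyReprStr e ++ ", got " ++ pyReprOpt g

-- ===== PORT A =====
def compare_expected (report : List (String × List (List (String × String)))) (expected : List (String × String)) : List String :=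
  let axisResults := (PySem.Dict.ofList report).getD "axis_results" []
  -- by = {r.get("axis"): r.get("status") for r in … if isinstance(r, Mapping)}
  -- (every element of axis_results is a dict under the type convention, so the guard always holds)
  let byD : PySem.Dict (Option String) (Option String) :=
    axisResults.foldl (fun d r =>
      d.insert ((PySem.Dict.ofList r).get? "axis") ((PySem.Dict.ofList r).get? "status"))
      PySem.Dict.empty
  ((PySem.Dict.ofList expected).items.filter
      (fun p => byD.getD (some p.1) none != some p.2)).map
    (fun p => pvFmt p.1 p.2 (byD.getD (some p.1) none))

-- ===== PORT B =====
def compare_expected_alt (report : List (String × List (List (String × String)))) (expected : List (String × String)) : List String :=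
  let records := (PySem.Dict.ofList report).getD "axis_results" []
  (PySem.Dict.ofList expected).items.foldl (fun problems p =>
    let found : Option String := records.foldl (fun f r =>
      if (PySem.Dict.ofList r).get? "axis" == some p.1
      then (PySem.Dict.ofList r).get? "status" else f) none
    if found != some p.2 then problems ++ [pvFmt p.1 p.2 found] else problems) []

-- ===== PRECONDITION & SPEC =====
def Spec_compare_expected (report : List (String × List (List (String × String)))) (expected : List (String × String)) (out : List String) : Prop := out = compare_expected_alt report expected
instance (report : List (String × List (List (String × String)))) (expected : List (String × String)) (out : List String) : Decidable (Spec_compare_expected report expected out) := by unfold Spec_compare_expected; infer_instance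

-- ===== CLAIM (what is proved, stated in full; the proofs are below) =====
def Claim_equal_compare_expected : Prop := ∀ (report : List (String × List (List (String × String)))) (expected : List (String × String)), Dom_compare_expected report expected → Spec_compare_expected report expected (compare_expected report expected)

-- ===== LEMMAS AND PROOFS =====

-- A's dict lookup after the build loop equals B's last-match scan of the same records.
theorem lastMatch_eq_getD (rs : List (List (String × String)))
    (d : PySem.Dict (Option String) (Option String)) (q : Option String) :
    (rs.foldl (fun d r =>
        d.insert ((PySem.Dict.ofList r).get? "axis") ((PySem.Dict.ofList r).get? "status")) d).getD q none
    = rs.foldl (fun f r =>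
        if (PySem.Dict.ofList r).get? "axis" == q
        then (PySem.Dict.ofList r).get? "status" else f) (d.getD q none) := by
  induction rs generalizing d with
  | nil => rfl
  | cons r rs ih =>
    simp only [List.foldl_cons, ih, PySem.Dict.getD_insert, beq_iff_eq]
    congr 1
    by_cases h : (PySem.Dict.ofList r).get? "axis" = q
    · simp only [if_pos h, if_pos h.symm]
    · simp only [if_neg h, if_neg (fun hq : q = _ => h hq.symm)]

theorem compare_expected_spec : Claim_equal_compare_expected := by
  intro report expected _
  unfold Spec_compare_expected compare_expected compare_expected_alt
  rw [PySem.List.foldl_append_if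
      (p := fun p : String × String =>
        (((PySem.Dict.ofList report).getD "axis_results" []).foldl (fun f r =>
          if (PySem.Dict.ofList r).get? "axis" == some p.1
          then (PySem.Dict.ofList r).get? "status" else f) none) != some p.2)
      (f := fun p : String × String =>
        pvFmt p.1 p.2
          (((PySem.Dict.ofList report).getD "axis_results" []).foldl (fun f r =>
            if (PySem.Dict.ofList r).get? "axis" == some p.1
            then (PySem.Dict.ofList r).get? "status" else f) none))]
  simp only [List.nil_append]
  have h : ∀ a : String,
      ((((PySem.Dict.ofList report).getD "axis_results" []).foldl (fun d r =>
          d.insert ((PySem.Dict.ofList r).get? "axis") ((PySem.Dict.ofList r).get? "status"))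
          PySem.Dict.empty).getD (some a) none)
      = (((PySem.Dict.ofList report).getD "axis_results" []).foldl (fun f r =>
          if (PySem.Dict.ofList r).get? "axis" == some a
          then (PySem.Dict.ofList r).get? "status" else f) none) := by
    intro a
    rw [lastMatch_eq_getD, PySem.Dict.getD_empty]
  simp only [h]
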